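-- pv_equiv track=rewrite | github.com/edwardianec/hystogram_equalization | fuzzy_processing_v2.py | histogram_borders
-- ===== SOURCE A (Python) =====
-- def histogram_borders(h):
-- 	keys = list(h.keys())
-- 	for el in h:
-- 		if (h[el]>5):
-- 			left = el
-- 			break
-- 	for el in reversed(keys):
-- 		if (h[el]>5):
-- 			right = el
-- 			break
-- 	return (left, right)
-- ===== SOURCE B (Python) =====
-- def histogram_borders(h):
-- 	found = False
-- 	for el in h:
-- 		if h[el] > 5:
-- 			if not found:
-- 				left = el
-- 				found = True
-- 			right = el
-- 	return (left, right)
-- ===== Notes on version B (the rewrite author's own statement) =====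
-- stated objective: simpler
-- what changed: Replaces A's two scans (forward for the left border, reversed for the right) by one forward pass that records the first and the last key whose count exceeds 5.
import Mathlib
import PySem

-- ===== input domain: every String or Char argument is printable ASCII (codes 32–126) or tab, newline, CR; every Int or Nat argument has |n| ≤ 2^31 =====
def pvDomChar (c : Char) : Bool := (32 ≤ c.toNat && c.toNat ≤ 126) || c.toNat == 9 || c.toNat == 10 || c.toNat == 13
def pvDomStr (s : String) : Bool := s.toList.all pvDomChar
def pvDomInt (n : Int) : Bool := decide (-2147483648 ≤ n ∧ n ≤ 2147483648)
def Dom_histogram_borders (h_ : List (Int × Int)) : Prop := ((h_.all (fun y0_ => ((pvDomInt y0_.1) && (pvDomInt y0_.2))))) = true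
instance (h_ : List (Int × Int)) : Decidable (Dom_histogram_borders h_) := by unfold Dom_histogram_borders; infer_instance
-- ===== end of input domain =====

-- B replaces A's two scans over the keys (forward, then reversed) by one forward pass
-- recording the first and the last key whose count exceeds 5 (objective: simpler).


-- ===== PORT A =====
-- first key in ks whose value in d exceeds 5 (A's for-loop with break; none = loop fell through, variable unbound)
def pvFirstOver (d : PySem.Dict Int Int) : List Int → Option Int
  | [] => none
  | k :: ks => if d.getD k 0 > 5 then some k else pvFirstOver d ks

def histogram_borders (h_ : List (Int × Int)) : Int × Int :=
  let d := PySem.Dict.ofList h_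
  let keys := d.keys
  -- h[el] with el drawn from the keys is always present, so getD is exact here
  match pvFirstOver d keys with
  | some l =>
    match pvFirstOver d keys.reverse with
    | some r => (l, r)
    | none => (0, 0)   -- unreachable under Pre_ (Python raises NameError here)
  | none => (0, 0)     -- unreachable under Pre_ (Python raises NameError here)

-- ===== PORT B =====
-- single forward pass carrying (left, right); left is set only once, right every time
def pvScan (d : PySem.Dict Int Int) : List Int → Option Int → Option Int → Option Int × Option Int
  | [], left, right => (left, right)
  | k :: ks, left, right =>
    if d.getD k 0 > 5 then
      pvScan d ks (if left.isNone then some k else left) (some k)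
    else
      pvScan d ks left right

def histogram_borders_alt (h_ : List (Int × Int)) : Int × Int :=
  let d := PySem.Dict.ofList h_
  let lr := pvScan d d.keys none none
  -- .getD 0 is unreachable under Pre_ (Python raises NameError when no key qualifies)
  (lr.1.getD 0, lr.2.getD 0)

-- ===== PRECONDITION & SPEC =====
-- Pre_ excludes exactly the inputs where no key has value > 5: there both Pythons raise NameError.
def Pre_histogram_borders (h_ : List (Int × Int)) : Prop :=
  ∃ k ∈ (PySem.Dict.ofList h_).keys, (PySem.Dict.ofList h_).getD k 0 > 5
instance (h_ : List (Int × Int)) : Decidable (Pre_histogram_borders h_) := by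
  unfold Pre_histogram_borders; infer_instance
def pvWitness_histogram_borders : (List (Int × Int)) := [(1, 10)]
def Spec_histogram_borders (h_ : List (Int × Int)) (out : Int × Int) : Prop := out = histogram_borders_alt h_
instance (h_ : List (Int × Int)) (out : Int × Int) : Decidable (Spec_histogram_borders h_ out) := by unfold Spec_histogram_borders; infer_instance

-- ===== CLAIM (what is proved, stated in full; the proofs are below) =====
def Claim_equal_histogram_borders : Prop := ∀ (h_ : List (Int × Int)), Dom_histogram_borders h_ → Pre_histogram_borders h_ → Spec_histogram_borders h_ (histogram_borders h_)

-- ===== LEMMAS AND PROOFS =====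
theorem pvFirstOver_append (d : PySem.Dict Int Int) (xs ys : List Int) :
    pvFirstOver d (xs ++ ys) = (pvFirstOver d xs).orElse (fun _ => pvFirstOver d ys) := by
  induction xs with
  | nil => simp [pvFirstOver]
  | cons k ks ih =>
    simp only [List.cons_append, pvFirstOver]
    split_ifs <;> simp [ih]

theorem pvScan_eq (d : PySem.Dict Int Int) (ks : List Int) (left right : Option Int) :
    pvScan d ks left right =
      (left.orElse (fun _ => pvFirstOver d ks),
       (pvFirstOver d ks.reverse).orElse (fun _ => right)) := by
  induction ks generalizing left right with
  | nil => simp [pvScan, pvFirstOver]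
  | cons k ks ih =>
    by_cases hc : d.getD k 0 > 5 <;> cases left <;> cases hrev : pvFirstOver d ks.reverse <;>
      simp [pvScan, pvFirstOver, List.reverse_cons, pvFirstOver_append, hc, ih, hrev,
        Option.orElse]

theorem pvFirstOver_isSome (d : PySem.Dict Int Int) (ks : List Int)
    (h : ∃ k ∈ ks, d.getD k 0 > 5) : (pvFirstOver d ks).isSome := by
  induction ks with
  | nil => simp at h
  | cons k ks ih =>
    simp only [pvFirstOver]
    split_ifs with hc
    · rfl
    · apply ih
      rcases h with ⟨j, hj, hgt⟩
      rcases List.mem_cons.mp hj with rfl | hj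
      · exact absurd hgt hc
      · exact ⟨j, hj, hgt⟩

-- ===== VERDICT (by name: the statement is the Claim_ definition above) =====
theorem histogram_borders_spec : Claim_equal_histogram_borders := by
  intro h_ _ hpre
  unfold Spec_histogram_borders histogram_borders histogram_borders_alt
  simp only
  rw [pvScan_eq]
  have hl := pvFirstOver_isSome (PySem.Dict.ofList h_) (PySem.Dict.ofList h_).keys hpre
  have hr := pvFirstOver_isSome (PySem.Dict.ofList h_) (PySem.Dict.ofList h_).keys.reverse
    (by rcases hpre with ⟨k, hk, hgt⟩; exact ⟨k, List.mem_reverse.mpr hk, hgt⟩)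
  obtain ⟨l, hl⟩ := Option.isSome_iff_exists.mp hl
  obtain ⟨r, hr⟩ := Option.isSome_iff_exists.mp hr
  rw [hl, hr]
  simp [Option.orElse]
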